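-- pv_equiv track=rewrite | github.com/fbjxu/Data-Science-Python |  Caesar shift cipher 1c.py | build_transpose_dict
-- ===== SOURCE A (Python) =====
-- CONSONANTS_LOWER = 'bcdfghjklmnpqrstvwxyz'
--
-- CONSONANTS_UPPER = 'BCDFGHJKLMNPQRSTVWXYZ'
--
-- def build_transpose_dict(vowels_permutation):
--     '''
--     vowels_permutation (string): a string containing a permutation of vowels (a, e, i, o, u)
--
--     Creates a dictionary that can be used to apply a cipher to a letter.
--     The dictionary maps every uppercase and lowercase letter to an
--     uppercase and lowercase letter, respectively. Vowels are shuffled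
--     according to vowels_permutation. The first letter in vowels_permutation
--     corresponds to a, the second to e, and so on in the order a, e, i, o, u.
--     The consonants remain the same. The dictionary should have 52
--     keys of all the uppercase letters and all the lowercase letters.
--
--     Example: When input "eaiuo":
--     Mapping is a->e, e->a, i->i, o->u, u->o
--     and "Hello World!" maps to "Hallu Wurld!"
--
--     Returns: a dictionary mapping a letter (string) to
--              another letter (string).
--     '''
--
--     #step 1 create a dictionary that maps all consonant letters to themselves
--     alphabet_map = {}
--     for elt in CONSONANTS_LOWER:
--         alphabet_map[elt] = elt
--     for elt in CONSONANTS_UPPER: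
--         alphabet_map[elt] = elt
--     alphabet_map['A'] = vowels_permutation[0].upper()
--     alphabet_map['E'] = vowels_permutation[1].upper()
--     alphabet_map['I'] = vowels_permutation[2].upper()
--     alphabet_map['O'] = vowels_permutation[3].upper()
--     alphabet_map['U'] = vowels_permutation[4].upper()
--     alphabet_map['a'] = vowels_permutation[0].lower()
--     alphabet_map['e'] = vowels_permutation[1].lower()
--     alphabet_map['i'] = vowels_permutation[2].lower()
--     alphabet_map['o'] = vowels_permutation[3].lower()
--     alphabet_map['u'] = vowels_permutation[4].lower()
--     return alphabet_map
-- ===== SOURCE B (Python) =====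
-- CONSONANTS_LOWER = 'bcdfghjklmnpqrstvwxyz'
--
-- CONSONANTS_UPPER = 'BCDFGHJKLMNPQRSTVWXYZ'
--
-- def build_transpose_dict(vowels_permutation):
--     # Whole-string translation: list the 52 keys once in order, translate that
--     # key string through a maketrans table, and zip keys with values.
--     sub_lower = ''.join(vowels_permutation[i].lower() for i in range(5))
--     sub_upper = ''.join(vowels_permutation[i].upper() for i in range(5))
--     table = str.maketrans('aeiouAEIOU', sub_lower + sub_upper)
--     keys = CONSONANTS_LOWER + CONSONANTS_UPPER + 'AEIOU' + 'aeiou'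
--     return dict(zip(keys, keys.translate(table)))
-- ===== Notes on version B (the rewrite author's own statement) =====
-- stated objective: simpler
-- what changed: B lists the 52 keys once in their final order as one string, builds a maketrans vowel table, translates the whole key string through it in one call, and zips keys with values into the dict, replacing A's two consonant loops and ten hard-coded per-vowel assignment statements.
import Mathlib
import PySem

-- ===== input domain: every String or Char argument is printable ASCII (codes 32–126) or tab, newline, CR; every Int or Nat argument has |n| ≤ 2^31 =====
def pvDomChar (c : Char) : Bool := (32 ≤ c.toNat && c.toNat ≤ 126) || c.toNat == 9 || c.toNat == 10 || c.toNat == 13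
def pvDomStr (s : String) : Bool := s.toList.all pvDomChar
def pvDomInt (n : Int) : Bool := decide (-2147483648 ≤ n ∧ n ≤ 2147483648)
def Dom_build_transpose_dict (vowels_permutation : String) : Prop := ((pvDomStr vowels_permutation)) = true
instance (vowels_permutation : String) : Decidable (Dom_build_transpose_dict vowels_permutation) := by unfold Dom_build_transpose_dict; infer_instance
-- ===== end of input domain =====

-- B replaces A's two consonant loops and ten hard-coded vowel assignments by listing the 52 keys
-- once in order, translating that key string through a maketrans table, and zipping keys with
-- values (objective: simpler).

-- ===== PORT A =====
-- Every key and value of A's dict is a 1-character Python string: ports keep them as Char and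
-- convert to String pairs at the return (exact: 1-char ASCII str ↔ Char).
def pvConsLower : List Char := "bcdfghjklmnpqrstvwxyz".toList
def pvConsUpper : List Char := "BCDFGHJKLMNPQRSTVWXYZ".toList

def build_transpose_dict (vowels_permutation : String) : List (String × String) :=
  -- step 1: consonants map to themselves (two loops, as in A)
  let m0 : PySem.Dict Char Char :=
    pvConsLower.foldl (fun d c => d.insert c c) PySem.Dict.empty
  let m1 : PySem.Dict Char Char :=
    pvConsUpper.foldl (fun d c => d.insert c c) m0
  -- vowels_permutation[i] raises IndexError when len < 5: none here, excluded by Pre_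
  match PySem.Str.pyGet? vowels_permutation 0, PySem.Str.pyGet? vowels_permutation 1,
        PySem.Str.pyGet? vowels_permutation 2, PySem.Str.pyGet? vowels_permutation 3,
        PySem.Str.pyGet? vowels_permutation 4 with
  | some v0, some v1, some v2, some v3, some v4 =>
      ((((((((((m1.insert 'A' (PySem.Chars.upperChar v0)).insert 'E' (PySem.Chars.upperChar v1)).insert 'I' (PySem.Chars.upperChar v2)).insert 'O' (PySem.Chars.upperChar v3)).insert 'U' (PySem.Chars.upperChar v4)).insert 'a' (PySem.Chars.lowerChar v0)).insert 'e' (PySem.Chars.lowerChar v1)).insert 'i' (PySem.Chars.lowerChar v2)).insert 'o' (PySem.Chars.lowerChar v3)).insert 'u' (PySem.Chars.lowerChar v4)).items.map (fun kv => (String.ofList [kv.1], String.ofList [kv.2]))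
  | _, _, _, _, _ => []

-- ===== PORT B =====
def build_transpose_dict_alt (vowels_permutation : String) : List (String × String) :=
  -- sub_lower / sub_upper = ''.join(vowels_permutation[i].lower()/.upper() for i in range(5));
  -- none = IndexError, excluded by Pre_
  let subLower? : Option (List Char) :=
    (PySem.List.pyRange 0 5 1).foldl
      (fun acc? i =>
        match acc? with
        | none => none
        | some acc =>
          match PySem.Str.pyGet? vowels_permutation i with
          | none => none
          | some c => some (acc ++ [PySem.Chars.lowerChar c]))
      (some [])
  let subUpper? : Option (List Char) :=
    (PySem.List.pyRange 0 5 1).foldl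
      (fun acc? i =>
        match acc? with
        | none => none
        | some acc =>
          match PySem.Str.pyGet? vowels_permutation i with
          | none => none
          | some c => some (acc ++ [PySem.Chars.upperChar c]))
      (some [])
  match subLower? with
  | none => []
  | some lo =>
  match subUpper? with
  | none => []
  | some up =>
    -- table = str.maketrans('aeiouAEIOU', sub_lower + sub_upper)
    let table : PySem.Dict Char Char :=
      (List.zip "aeiouAEIOU".toList (lo ++ up)).foldl
        (fun d kv => d.insert kv.1 kv.2) PySem.Dict.empty
    -- keys = CONSONANTS_LOWER + CONSONANTS_UPPER + 'AEIOU' + 'aeiou'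
    let keys : List Char :=
      "bcdfghjklmnpqrstvwxyz".toList ++ "BCDFGHJKLMNPQRSTVWXYZ".toList
        ++ "AEIOU".toList ++ "aeiou".toList
    -- keys.translate(table): each char replaced by its table image, unchanged if absent
    let values : List Char := keys.map (fun c => table.getD c c)
    -- dict(zip(keys, values))
    ((List.zip keys values).foldl
        (fun d kv => d.insert kv.1 kv.2) (PySem.Dict.empty : PySem.Dict Char Char)).items.map
      (fun kv => (String.ofList [kv.1], String.ofList [kv.2]))

-- ===== PRECONDITION & SPEC =====
-- Pre_ excludes exactly the strings of length < 5, on which A (and B) raise IndexError.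
def Pre_build_transpose_dict (vowels_permutation : String) : Prop :=
  5 ≤ vowels_permutation.toList.length
instance (vowels_permutation : String) : Decidable (Pre_build_transpose_dict vowels_permutation) := by
  unfold Pre_build_transpose_dict; infer_instance
def pvWitness_build_transpose_dict : String := "eaiuo"
def Spec_build_transpose_dict (vowels_permutation : String) (out : List (String × String)) : Prop :=
  out = build_transpose_dict_alt vowels_permutation
instance (vowels_permutation : String) (out : List (String × String)) : Decidable (Spec_build_transpose_dict vowels_permutation out) := by unfold Spec_build_transpose_dict; infer_instance

-- ===== CLAIM (what is proved, stated in full; the proofs are below) =====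
def Claim_equal_build_transpose_dict : Prop := ∀ (vowels_permutation : String), Dom_build_transpose_dict vowels_permutation → Pre_build_transpose_dict vowels_permutation → Spec_build_transpose_dict vowels_permutation (build_transpose_dict vowels_permutation)

-- ===== LEMMAS AND PROOFS =====

def pvConsPairsL : List (Char × Char) := [('b','b'),('c','c'),('d','d'),('f','f'),('g','g'),('h','h'),('j','j'),('k','k'),('l','l'),('m','m'),('n','n'),('p','p'),('q','q'),('r','r'),('s','s'),('t','t'),('v','v'),('w','w'),('x','x'),('y','y'),('z','z'),('B','B'),('C','C'),('D','D'),('F','F'),('G','G'),('H','H'),('J','J'),('K','K'),('L','L'),('M','M'),('N','N'),('P','P'),('Q','Q'),('R','R'),('S','S'),('T','T'),('V','V'),('W','W'),('X','X'),('Y','Y'),('Z','Z')]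
def pvKeysL : List Char := ['b','c','d','f','g','h','j','k','l','m','n','p','q','r','s','t','v','w','x','y','z','B','C','D','F','G','H','J','K','L','M','N','P','Q','R','S','T','V','W','X','Y','Z','A','E','I','O','U','a','e','i','o','u']


lemma pv_five_cons (l : List Char) (h : 5 ≤ l.length) :
    ∃ a b c d e t, l = a::b::c::d::e::t := by
  rcases l with _|⟨a,l⟩; · simp at h
  rcases l with _|⟨b,l⟩; · simp at h
  rcases l with _|⟨c,l⟩; · simp at h
  rcases l with _|⟨d,l⟩; · simp at h
  rcases l with _|⟨e,l⟩; · simp at h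
  exact ⟨a,b,c,d,e,l,rfl⟩

-- ===== VERDICT (by name: the statement is the Claim_ definition above) =====
set_option maxRecDepth 20000 in
theorem build_transpose_dict_spec : Claim_equal_build_transpose_dict := by
  intro vp _ hpre
  obtain ⟨v0,v1,v2,v3,v4,t,h⟩ := pv_five_cons vp.toList hpre
  unfold Spec_build_transpose_dict build_transpose_dict build_transpose_dict_alt
  simp only [PySem.Str.pyGet?, PySem.Chars.pyGet?_eq_listPyGet?, h]
  have g0 : PySem.List.pyGet? (v0::v1::v2::v3::v4::t) 0 = some v0 :=
    PySem.List.pyGet?_zero_cons _ _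
  have g1 : PySem.List.pyGet? (v0::v1::v2::v3::v4::t) 1 = some v1 := by
    simpa using PySem.List.pyGet?_of_nonneg (xs := v0::v1::v2::v3::v4::t) (i := 1) (by norm_num)
  have g2 : PySem.List.pyGet? (v0::v1::v2::v3::v4::t) 2 = some v2 := by
    simpa using PySem.List.pyGet?_of_nonneg (xs := v0::v1::v2::v3::v4::t) (i := 2) (by norm_num)
  have g3 : PySem.List.pyGet? (v0::v1::v2::v3::v4::t) 3 = some v3 := by
    simpa using PySem.List.pyGet?_of_nonneg (xs := v0::v1::v2::v3::v4::t) (i := 3) (by norm_num)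
  have g4 : PySem.List.pyGet? (v0::v1::v2::v3::v4::t) 4 = some v4 := by
    simpa using PySem.List.pyGet?_of_nonneg (xs := v0::v1::v2::v3::v4::t) (i := 4) (by norm_num)
  rw [show PySem.List.pyRange 0 5 1 = [0,1,2,3,4] from by decide]
  simp only [List.foldl_cons, List.foldl_nil, g0, g1, g2, g3, g4]
  -- normalize B's joined substitution strings to literal lists
  simp only [List.nil_append, List.cons_append]
  -- A's consonant base dict, fully concrete
  rw [show (pvConsUpper.foldl (fun d c => d.insert c c)
        (pvConsLower.foldl (fun d c => d.insert c c) PySem.Dict.empty))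
      = PySem.Dict.mk pvConsPairsL from by decide]
  -- A's ten vowel inserts are fresh keys: items append one by one
  rw [PySem.Dict.items_insert_of_not_contains _ _ (by simp only [PySem.Dict.contains_insert]; decide),
      PySem.Dict.items_insert_of_not_contains _ _ (by simp only [PySem.Dict.contains_insert]; decide),
      PySem.Dict.items_insert_of_not_contains _ _ (by simp only [PySem.Dict.contains_insert]; decide),
      PySem.Dict.items_insert_of_not_contains _ _ (by simp only [PySem.Dict.contains_insert]; decide),
      PySem.Dict.items_insert_of_not_contains _ _ (by simp only [PySem.Dict.contains_insert]; decide),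
      PySem.Dict.items_insert_of_not_contains _ _ (by simp only [PySem.Dict.contains_insert]; decide),
      PySem.Dict.items_insert_of_not_contains _ _ (by simp only [PySem.Dict.contains_insert]; decide),
      PySem.Dict.items_insert_of_not_contains _ _ (by simp only [PySem.Dict.contains_insert]; decide),
      PySem.Dict.items_insert_of_not_contains _ _ (by simp only [PySem.Dict.contains_insert]; decide),
      PySem.Dict.items_insert_of_not_contains _ _ (by decide)]
  -- B: evaluate the maketrans zip and its fold into a chain of inserts
  rw [show "aeiouAEIOU".toList = ['a','e','i','o','u','A','E','I','O','U'] from rfl]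
  simp only [List.zip_cons_cons, List.zip_nil_right, List.foldl_cons, List.foldl_nil]
  -- B: literal key string
  rw [show ("bcdfghjklmnpqrstvwxyz".toList ++ "BCDFGHJKLMNPQRSTVWXYZ".toList
        ++ "AEIOU".toList ++ "aeiou".toList) = pvKeysL from rfl]
  -- dict(zip(keys, keys.translate(table))): fold over distinct fresh keys appends
  rw [← List.map_prod_left_eq_zip, List.foldl_map]
  rw [PySem.Dict.items_foldl_insert_fresh pvKeysL (fun c => c) _ PySem.Dict.empty
        (fun a _ => PySem.Dict.contains_empty a) (by decide)]
  simp [pvKeysL, pvConsPairsL, PySem.Dict.getD_insert, PySem.Dict.getD_empty]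
  rfl
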